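-- pv_equiv track=rewrite | github.com/named-data/PyNDN2 | python/pyndn/util/boost_info_parser.py | shlex_split
-- ===== SOURCE A (Python) =====
-- def shlex_split(s):
--     """
--     Similar to shlex.split, split s into an array of strings which are
--     separated by whitespace, treating a string within quotes as a single entity
--     regardless of whitespace between the quotes. Also allow a backslash to
--     escape the next character.
--
--     :param str s: The input string to split.
--     :return: An array of strings.
--     :rtype: list of str
--     """
--     result = []
--     if s == "":
--         return result
--     whiteSpace = " \t\n\r"
--     iStart = 0
--
--     while True:
--         # Move iStart past whitespace.
--         while s[iStart] in whiteSpace: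
--             iStart += 1
--             if iStart >= len(s):
--                 # Done.
--                 return result
--
--         # Move iEnd to the end of the token.
--         iEnd = iStart
--         inQuotation = False
--         token = ""
--         while True:
--             if s[iEnd] == '\\':
--                 # Append characters up to the backslash, skip the backslash and
--                 #   move iEnd past the escaped character.
--                 token += s[iStart:iEnd]
--                 iStart = iEnd + 1
--                 iEnd = iStart
--                 if iEnd >= len(s):
--                     # An unusual case: A backslash at the end of the string.
--                     break
--             else:
--                 if inQuotation:
--                     if s[iEnd] == '\"':
--                         # Append characters up to the end quote and skip.
--                         token += s[iStart:iEnd]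
--                         iStart = iEnd + 1
--                         inQuotation = False
--                 else:
--                     if s[iEnd] == '\"':
--                         # Append characters up to the start quote and skip.
--                         token += s[iStart:iEnd]
--                         iStart = iEnd + 1
--                         inQuotation = True
--                     else:
--                         if s[iEnd] in whiteSpace:
--                             break
--
--             iEnd += 1
--             if iEnd >= len(s):
--                 break
--
--         token += s[iStart:iEnd]
--         result.append(token)
--         if iEnd >= len(s):
--             # Done.
--             return result
--
--         iStart = iEnd
-- ===== SOURCE B (Python) =====
-- def shlex_split(s):
--     """Single flat character-state-machine rewrite of shlex_split."""
--     result = []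
--     buf = []
--     in_quote = False
--     escape_next = False
--     started = False
--     for c in s:
--         if escape_next:
--             buf.append(c)
--             escape_next = False
--         elif c == '\\':
--             escape_next = True
--             started = True
--         elif in_quote:
--             if c == '"':
--                 in_quote = False
--             else:
--                 buf.append(c)
--         elif c == '"':
--             in_quote = True
--             started = True
--         elif c in " \t\n\r":
--             if started:
--                 result.append(''.join(buf))
--                 buf = []
--                 started = False
--         else:
--             buf.append(c)
--             started = True
--     if started:
--         result.append(''.join(buf))
--     return result
-- ===== Notes on version B (the rewrite author's own statement) =====
-- stated objective: simpler
-- what changed: Replaced A's nested while-loops over string indices with slice accumulation (iStart/iEnd bookkeeping, token += s[iStart:iEnd]) by a single flat for-loop over the characters maintaining a token buffer and in_quote/escape_next/started flags.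
import Mathlib
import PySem

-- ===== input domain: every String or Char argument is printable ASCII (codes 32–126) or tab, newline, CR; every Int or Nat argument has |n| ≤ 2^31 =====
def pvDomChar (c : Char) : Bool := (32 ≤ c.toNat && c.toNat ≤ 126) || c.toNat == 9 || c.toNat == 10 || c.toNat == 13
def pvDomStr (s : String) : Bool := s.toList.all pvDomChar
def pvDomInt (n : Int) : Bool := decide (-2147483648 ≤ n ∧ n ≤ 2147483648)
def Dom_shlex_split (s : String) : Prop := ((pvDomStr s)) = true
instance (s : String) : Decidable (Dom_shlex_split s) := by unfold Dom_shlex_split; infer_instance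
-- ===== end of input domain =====

-- B replaces A's index/slice juggling by one flat per-character state machine (token buffer + in_quote/escape/started flags); objective: simpler.

-- ===== PORT A =====
-- Each Python "while True" loop is ported with a fuel counter (structural recursion);
-- fuel s.length + 1 is enough for every loop, so the fuel-0 branch is never reached.

-- whiteSpace = " \t\n\r"
def wsA : List Char := [' ', '\t', '\n', '\r']

-- "while s[iStart] in whiteSpace: iStart += 1; if iStart >= len(s): return result"
def aSkip (cs : List Char) (fuel i : Nat) : Option Nat :=
  match fuel with
  | 0 => none
  | fuel + 1 =>
    if h : i < cs.length then
      if cs[i] ∈ wsA then aSkip cs fuel (i + 1) else some i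
    else none

-- the inner "while True" token loop; returns (token, iStart, iEnd) at its break point
-- (the final "token += s[iStart:iEnd]" is done by the caller, as in the Python)
def aInner (cs : List Char) (fuel iStart iEnd : Nat) (inQ : Bool) (token : List Char) :
    List Char × Nat × Nat :=
  match fuel with
  | 0 => (token, iStart, iEnd)
  | fuel + 1 =>
    if h : iEnd < cs.length then
      if cs[iEnd] = '\\' then
        let token' := token ++ cs.extract iStart iEnd
        if iEnd + 1 < cs.length then aInner cs fuel (iEnd + 1) (iEnd + 2) inQ token'
        else (token', iEnd + 1, iEnd + 1)            -- backslash at the end of the string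
      else if inQ then
        if cs[iEnd] = '"' then aInner cs fuel (iEnd + 1) (iEnd + 1) false (token ++ cs.extract iStart iEnd)
        else aInner cs fuel iStart (iEnd + 1) true token
      else if cs[iEnd] = '"' then aInner cs fuel (iEnd + 1) (iEnd + 1) true (token ++ cs.extract iStart iEnd)
      else if cs[iEnd] ∈ wsA then (token, iStart, iEnd)
      else aInner cs fuel iStart (iEnd + 1) false token
    else (token, iStart, iEnd)                       -- "if iEnd >= len(s): break"

-- the outer "while True" loop
def aOuter (cs : List Char) (fuel iStart : Nat) (result : List String) : List String :=
  match fuel with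
  | 0 => result
  | fuel + 1 =>
    match aSkip cs (cs.length + 1) iStart with
    | none => result
    | some i =>
      let r := aInner cs (cs.length + 1) i i false []
      let result' := result ++ [String.ofList (r.1 ++ cs.extract r.2.1 r.2.2)]
      if r.2.2 < cs.length then aOuter cs fuel r.2.2 result' else result'

def shlex_split (s : String) : List String :=
  if s = "" then [] else aOuter s.toList (s.toList.length + 1) 0 []

-- ===== PORT B =====
def wsB : List Char := [' ', '\t', '\n', '\r']

def bLoop (rest : List Char) (buf : List Char) (inQ esc started : Bool)
    (res : List String) : List String :=
  match rest with
  | [] => if started then res ++ [String.ofList buf] else res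
  | c :: rest =>
    if esc then bLoop rest (buf ++ [c]) inQ false started res
    else if c = '\\' then bLoop rest buf inQ true true res
    else if inQ then
      if c = '"' then bLoop rest buf false false started res
      else bLoop rest (buf ++ [c]) true false started res
    else if c = '"' then bLoop rest buf true false true res
    else if c ∈ wsB then
      if started then bLoop rest [] false false false (res ++ [String.ofList buf])
      else bLoop rest buf false false false res
    else bLoop rest (buf ++ [c]) false false true res

def shlex_split_alt (s : String) : List String :=
  bLoop s.toList [] false false false []

-- ===== PRECONDITION & SPEC =====
def Spec_shlex_split (s : String) (out : List String) : Prop := out = shlex_split_alt s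
instance (s : String) (out : List String) : Decidable (Spec_shlex_split s out) := by unfold Spec_shlex_split; infer_instance

-- ===== CLAIM (what is proved, stated in full; the proofs are below) =====
def Claim_equal_shlex_split : Prop := ∀ (s : String), Dom_shlex_split s → Spec_shlex_split s (shlex_split s)

-- ===== LEMMAS AND PROOFS =====

theorem aSkip_le (cs : List Char) (fuel i : Nat) {j : Nat} (h : aSkip cs fuel i = some j) :
    i ≤ j ∧ j < cs.length ∧ ∀ hj : j < cs.length, cs[j] ∉ wsA := by
  fun_induction aSkip cs fuel i with
  | case1 i => simp_all
  | case2 i fuel hi hws ih => have := ih h; exact ⟨by omega, this.2⟩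
  | case3 i fuel hi hws =>
    obtain rfl : i = j := by simp_all
    exact ⟨le_rfl, hi, fun _ => hws⟩
  | case4 i fuel hi => simp_all

theorem aInner_ge (cs : List Char) (fuel iStart iEnd : Nat) (inQ : Bool) (token : List Char) :
    iEnd ≤ (aInner cs fuel iStart iEnd inQ token).2.2 := by
  fun_induction aInner cs fuel iStart iEnd inQ token <;> first | omega | (dsimp only; omega)

theorem aInner_gt (cs : List Char) (fuel i : Nat) (token : List Char)
    (hfuel : 0 < fuel) (hi : i < cs.length) (hws : cs[i] ∉ wsA) :
    i < (aInner cs fuel i i false token).2.2 := by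
  obtain ⟨fuel, rfl⟩ : ∃ f, fuel = f + 1 := ⟨fuel - 1, by omega⟩
  rw [aInner]
  simp only [dif_pos hi]
  split_ifs <;>
    first
      | (exact lt_of_lt_of_le (by omega) (aInner_ge cs _ _ _ _ _))
      | (exact absurd (by assumption) hws)
      | simp

theorem extract_succ (cs : List Char) (a b : Nat) (h1 : a ≤ b) (h2 : b < cs.length) :
    cs.extract a (b+1) = cs.extract a b ++ [cs[b]] := by
  have hb : b + 1 - a = (b - a) + 1 := by omega
  rw [List.extract_eq_take_drop, List.extract_eq_take_drop, hb, List.take_add_one]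
  have : (List.drop a cs)[b - a]? = some cs[b] := by
    rw [List.getElem?_drop]
    have : a + (b - a) = b := by omega
    rw [this, List.getElem?_eq_getElem h2]
  simp [this]

theorem ws_ne (c : Char) (h : c ∈ wsA) : c ≠ '\\' ∧ c ≠ '"' ∧ c ∈ wsB := by
  fin_cases h <;> decide

-- given enough fuel, the only way aInner breaks before the end of the string is at whitespace
theorem aInner_break_ws (cs : List Char) (fuel iStart iEnd : Nat) (inQ : Bool) (token : List Char) :
    cs.length < fuel + iEnd →
    ∀ hh : (aInner cs fuel iStart iEnd inQ token).2.2 < cs.length,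
      cs[(aInner cs fuel iStart iEnd inQ token).2.2] ∈ wsA := by
  fun_induction aInner cs fuel iStart iEnd inQ token with
  | case1 iStart iEnd inQ token => intro hf hh; dsimp only at hh; omega
  | case2 iStart iEnd inQ token fuel h hbs tk hlt ih => intro hf; exact ih (by omega)
  | case3 iStart iEnd inQ token fuel h hbs tk hlt => intro hf hh; dsimp only at hh; omega
  | case4 iStart iEnd token fuel h hbs hq ih => intro hf; exact ih (by omega)
  | case5 iStart iEnd token fuel h hbs hq ih => intro hf; exact ih (by omega)
  | case6 iStart iEnd inQ token fuel h hbs hnq hq ih => intro hf; exact ih (by omega)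
  | case7 iStart iEnd inQ token fuel h hbs hnq hq hws => intro hf hh; simpa using hws
  | case8 iStart iEnd inQ token fuel h hbs hnq hq hws ih => intro hf; exact ih (by omega)
  | case9 iStart iEnd inQ token fuel h => intro hf hh; dsimp only at hh; omega

-- skipping whitespace: A's aSkip vs B's not-started whitespace steps
theorem skip_sim (cs : List Char) (fuel i : Nat) (res : List String) :
    cs.length < fuel + i →
    bLoop (cs.drop i) [] false false false res =
      (match aSkip cs fuel i with
       | none => res
       | some j => bLoop (cs.drop j) [] false false false res) := by
  fun_induction aSkip cs fuel i with
  | case1 i => intro hf; rw [List.drop_eq_nil_of_le (by omega), bLoop]; simp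
  | case2 i fuel hi hws ih =>
    intro hf
    rw [List.drop_eq_getElem_cons hi]
    obtain ⟨h1, h2, h3⟩ := ws_ne cs[i] hws
    rw [bLoop]
    simp only [if_neg (by decide : ¬(false = true)), if_neg h1, if_neg h2, if_pos h3]
    exact ih (by omega)
  | case3 i fuel hi hws => intro hf; simp
  | case4 i fuel hi => intro hf; rw [List.drop_eq_nil_of_le (by omega), bLoop]; simp

-- at a non-whitespace char with no quote open, the started flag is irrelevant
theorem started_irrel (cs : List Char) (i : Nat) (buf : List Char) (res : List String)
    (hi : i < cs.length) (hws : cs[i] ∉ wsA) :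
    bLoop (cs.drop i) buf false false false res = bLoop (cs.drop i) buf false false true res := by
  rw [List.drop_eq_getElem_cons hi, bLoop, bLoop]
  split_ifs <;> simp_all [wsA, wsB]

-- main simulation of A's inner token loop by B's state machine
theorem inner_sim (cs : List Char) (fuel iStart iEnd : Nat) (inQ : Bool) (token : List Char)
    (res : List String) :
    iStart ≤ iEnd → cs.length < fuel + iEnd →
    bLoop (cs.drop iEnd) (token ++ cs.extract iStart iEnd) inQ false true res =
      (let r := aInner cs fuel iStart iEnd inQ token
       let res' := res ++ [String.ofList (r.1 ++ cs.extract r.2.1 r.2.2)]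
       if r.2.2 < cs.length then bLoop (cs.drop (r.2.2 + 1)) [] false false false res' else res') := by
  fun_induction aInner cs fuel iStart iEnd inQ token with
  | case1 iStart iEnd inQ token =>
    intro hle hf
    rw [List.drop_eq_nil_of_le (by omega : cs.length ≤ iEnd), bLoop]
    rw [if_neg (by omega : ¬ iEnd < cs.length)]
    simp
  | case2 iStart iEnd inQ token fuel h hbs tk hlt ih =>
    intro hle hf
    rw [List.drop_eq_getElem_cons h, bLoop]
    simp only [if_neg (by decide : ¬(false = true)), if_pos hbs]
    rw [List.drop_eq_getElem_cons hlt, bLoop]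
    have := ih (by omega) (by omega)
    rw [show (token ++ cs.extract iStart iEnd) ++ [cs[iEnd+1]]
          = tk ++ cs.extract (iEnd+1) (iEnd+2) by
        simp [tk, extract_succ cs (iEnd+1) (iEnd+1) le_rfl hlt]]
    exact this
  | case3 iStart iEnd inQ token fuel h hbs tk hlt =>
    intro hle hf
    rw [List.drop_eq_getElem_cons h, bLoop]
    simp only [if_neg (by decide : ¬(false = true)), if_pos hbs]
    rw [List.drop_eq_nil_of_le (by omega : cs.length ≤ iEnd + 1), bLoop, if_neg hlt]
    simp [tk]
  | case4 iStart iEnd token fuel h hbs hq ih =>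
    intro hle hf
    rw [List.drop_eq_getElem_cons h, bLoop]
    simp only [if_neg (by decide : ¬(false = true)), if_neg hbs, if_pos hq]
    have := ih (by omega) (by omega)
    simpa using this
  | case5 iStart iEnd token fuel h hbs hq ih =>
    intro hle hf
    rw [List.drop_eq_getElem_cons h, bLoop]
    simp only [if_neg (by decide : ¬(false = true)), if_neg hbs, if_neg hq]
    rw [show (token ++ cs.extract iStart iEnd) ++ [cs[iEnd]]
          = token ++ cs.extract iStart (iEnd+1) by
        simp [extract_succ cs iStart iEnd hle h]]
    exact ih (by omega) (by omega)
  | case6 iStart iEnd inQ token fuel h hbs hnq hq ih =>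
    intro hle hf
    rw [List.drop_eq_getElem_cons h, bLoop]
    simp only [if_neg (by decide : ¬(false = true)), if_neg hbs,
      if_neg hnq, if_pos hq]
    have := ih (by omega) (by omega)
    simpa using this
  | case7 iStart iEnd inQ token fuel h hbs hnq hq hws =>
    intro hle hf
    rw [List.drop_eq_getElem_cons h, bLoop]
    obtain ⟨w1, w2, w3⟩ := ws_ne cs[iEnd] hws
    simp only [if_neg (by decide : ¬(false = true)), if_neg hbs,
      if_neg hnq, if_neg hq, if_pos w3]
    rw [if_pos h]
    simp
  | case8 iStart iEnd inQ token fuel h hbs hnq hq hws ih =>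
    intro hle hf
    rw [List.drop_eq_getElem_cons h, bLoop]
    simp only [if_neg (by decide : ¬(false = true)), if_neg hbs,
      if_neg hnq, if_neg hq, if_neg (show cs[iEnd] ∉ wsB from hws)]
    rw [show (token ++ cs.extract iStart iEnd) ++ [cs[iEnd]]
          = token ++ cs.extract iStart (iEnd+1) by
        simp [extract_succ cs iStart iEnd hle h]]
    exact ih (by omega) (by omega)
  | case9 iStart iEnd inQ token fuel h =>
    intro hle hf
    rw [List.drop_eq_nil_of_le (by omega), bLoop, if_neg h]
    simp

theorem outer_sim (cs : List Char) (fuel i : Nat) (res : List String) :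
    cs.length < fuel + i →
    aOuter cs fuel i res = bLoop (cs.drop i) [] false false false res := by
  fun_induction aOuter cs fuel i res with
  | case1 i res =>
    intro hf
    rw [List.drop_eq_nil_of_le (by omega), bLoop]
    simp
  | case2 i res fuel h =>
    intro hf
    rw [skip_sim cs (cs.length + 1) i res (by omega), h]
  | case3 i res fuel j h r res' hlt ih =>
    intro hf
    rw [skip_sim cs (cs.length + 1) i res (by omega), h]
    dsimp only
    obtain ⟨h1, h2, h3⟩ := aSkip_le cs (cs.length + 1) i h
    rw [started_irrel cs j [] res h2 (h3 h2)]
    have := inner_sim cs (cs.length + 1) j j false [] res le_rfl (by omega)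
    have he : cs.extract j j = ([] : List Char) := by simp
    simp only [List.nil_append, he] at this
    rw [this]
    simp only [r] at hlt ⊢
    rw [if_pos hlt]
    have hgt := aInner_gt cs (cs.length + 1) j [] (by omega) h2 (h3 h2)
    simp only [r] at ih
    rw [ih (by omega)]
    have hw := aInner_break_ws cs (cs.length + 1) j j false [] (by omega) hlt
    rw [List.drop_eq_getElem_cons hlt, bLoop]
    obtain ⟨w1, w2, w3⟩ := ws_ne _ hw
    simp only [if_neg (by decide : ¬(false = true)), if_neg w1, if_neg w2, if_pos w3]
    simp only [res', r]
  | case4 i res fuel j h r res' hlt =>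
    intro hf
    rw [skip_sim cs (cs.length + 1) i res (by omega), h]
    dsimp only
    obtain ⟨h1, h2, h3⟩ := aSkip_le cs (cs.length + 1) i h
    rw [started_irrel cs j [] res h2 (h3 h2)]
    have := inner_sim cs (cs.length + 1) j j false [] res le_rfl (by omega)
    have he : cs.extract j j = ([] : List Char) := by simp
    simp only [List.nil_append, he] at this
    rw [this]
    simp only [r] at hlt ⊢
    rw [if_neg hlt]

-- ===== VERDICT (by name: the statement is the Claim_ definition above) =====
theorem shlex_split_spec : Claim_equal_shlex_split := by
  intro s _
  unfold Spec_shlex_split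
  rw [shlex_split, shlex_split_alt]
  split_ifs with h
  · subst h; rfl
  · rw [outer_sim s.toList (s.toList.length + 1) 0 [] (by omega), List.drop_zero]
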